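-- pv_equiv track=rewrite | github.com/oneaiguru/wfm-system | src/algorithms/mobile/conflict_resolver.py | _check_value_conflicts
-- ===== SOURCE A (Python) =====
-- from typing import Dict, List, Optional, Any, Tuple, Set
--
-- def _check_value_conflicts(device_changes: Dict[str, Dict[str, Any]]) -> bool:
--     """Check if there are actual value conflicts"""
--
--     # Get all unique field names
--     all_fields = set()
--     for changes in device_changes.values():
--         all_fields.update(changes.keys())
--
--     # Check each field for conflicts
--     for field in all_fields:
--         values = []
--         for device_id, changes in device_changes.items():
--             if field in changes:
--                 values.append(changes[field])
--
--         # If different values for same field, we have conflict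
--         if len(set(map(str, values))) > 1:
--             return True
--
--     return False
-- ===== SOURCE B (Python) =====
-- def _check_value_conflicts(device_changes):
--     """Conflict iff some field maps to two different stringified values across devices:
--     equivalently, there are more distinct (field, value) pairs than distinct fields."""
--     pairs = {(field, str(value))
--              for changes in device_changes.values()
--              for field, value in changes.items()}
--     fields = {field for field, _ in pairs}
--     return len(pairs) > len(fields)
-- ===== Notes on version B (the rewrite author's own statement) =====
-- stated objective: simpler
-- what changed: Replaces A's field-set plus per-field rescan of every device with one set comprehension and a cardinality comparison: conflict iff there are more distinct (field, value) pairs than distinct fields.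
import Mathlib
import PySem

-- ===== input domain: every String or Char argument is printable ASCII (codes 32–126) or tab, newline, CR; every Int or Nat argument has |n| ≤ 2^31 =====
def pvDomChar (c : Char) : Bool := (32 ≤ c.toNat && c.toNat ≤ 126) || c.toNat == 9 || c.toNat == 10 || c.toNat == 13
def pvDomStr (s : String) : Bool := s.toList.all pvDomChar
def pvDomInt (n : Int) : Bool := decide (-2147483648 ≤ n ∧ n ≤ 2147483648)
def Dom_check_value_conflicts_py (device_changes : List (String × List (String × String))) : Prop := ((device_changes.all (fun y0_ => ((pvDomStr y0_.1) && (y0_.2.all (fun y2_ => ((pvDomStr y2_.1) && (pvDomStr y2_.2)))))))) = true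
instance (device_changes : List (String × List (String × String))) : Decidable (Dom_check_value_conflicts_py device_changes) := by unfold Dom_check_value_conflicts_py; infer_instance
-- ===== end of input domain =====

-- B replaces A's field-set + per-field rescan by one pass of distinct (field, value)
-- pairs and a cardinality comparison (simpler, same cost; not faster).
-- ===== PORT A =====
def check_value_conflicts_py (device_changes : List (String × List (String × String))) : Bool :=
  -- all_fields = set(); for changes in device_changes.values(): all_fields.update(changes.keys())
  let all_fields : PySem.Set String :=
    device_changes.foldl (fun s d => PySem.Set.update s (d.2.map Prod.fst)) PySem.Set.empty
  -- for field in all_fields: values = [...]; if len(set(map(str, values))) > 1: return True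
  -- (iterating the set is safe here: any/exists does not depend on the set's order;
  --  'field in changes' / 'changes[field]' are assoc-list membership / first-match lookup)
  all_fields.any (fun field =>
    let values : List String :=
      device_changes.foldl (fun vs d =>
        if d.2.any (fun p => p.1 == field)
        then vs ++ [((d.2.find? (fun p => p.1 == field)).map Prod.snd).getD ""]
        else vs) []
    decide (1 < (PySem.Set.ofList values).length))

-- ===== PORT B =====
def check_value_conflicts_py_alt (device_changes : List (String × List (String × String))) : Bool :=
  -- pairs = {(field, str(value)) for changes in ... for field, value in changes.items()}
  let pairs : PySem.Set (String × String) :=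
    PySem.Set.ofList (device_changes.flatMap (fun d => d.2))
  -- fields = {field for field, _ in pairs}
  let fields : PySem.Set String := PySem.Set.ofList (pairs.map Prod.fst)
  -- return len(pairs) > len(fields)
  decide (PySem.Set.len fields < PySem.Set.len pairs)

-- ===== PRECONDITION & SPEC =====
-- Pre_: each inner association list denotes a Python dict, so its keys are pairwise
-- distinct; lists with duplicate field keys inside one device do not represent any
-- Python input and are excluded.
def Pre_check_value_conflicts_py (device_changes : List (String × List (String × String))) : Prop :=
  ∀ d ∈ device_changes, (d.2.map Prod.fst).Nodup

instance (device_changes : List (String × List (String × String))) : Decidable (Pre_check_value_conflicts_py device_changes) := by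
  unfold Pre_check_value_conflicts_py; infer_instance

def pvWitness_check_value_conflicts_py : (List (String × List (String × String))) :=
  [("dev1", [("f", "1"), ("g", "2")]), ("dev2", [("f", "1")])]

def Spec_check_value_conflicts_py (device_changes : List (String × List (String × String))) (out : Bool) : Prop := out = check_value_conflicts_py_alt device_changes
instance (device_changes : List (String × List (String × String))) (out : Bool) : Decidable (Spec_check_value_conflicts_py device_changes out) := by unfold Spec_check_value_conflicts_py; infer_instance

-- ===== CLAIM (what is proved, stated in full; the proofs are below) =====
def Claim_equal_check_value_conflicts_py : Prop := ∀ (device_changes : List (String × List (String × String))), Dom_check_value_conflicts_py device_changes → Pre_check_value_conflicts_py device_changes → Spec_check_value_conflicts_py device_changes (check_value_conflicts_py device_changes)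

-- ===== LEMMAS AND PROOFS =====

-- the flat list of all (field, value) pairs across devices
def pvPairs (device_changes : List (String × List (String × String))) : List (String × String) :=
  device_changes.flatMap (fun d => d.2)

-- "some field carries two different values" — the common characterisation of both ports
def pvConflict (device_changes : List (String × List (String × String))) : Prop :=
  ∃ p ∈ pvPairs device_changes, ∃ q ∈ pvPairs device_changes, p.1 = q.1 ∧ p.2 ≠ q.2

theorem pv_ofList_sublist {α : Type} [BEq α] [LawfulBEq α] (xs : List α) :
    (PySem.Set.ofList xs).Sublist xs := by
  induction xs with
  | nil => simp [PySem.Set.ofList_nil]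
  | cons x xs ih =>
    rw [PySem.Set.ofList_cons]
    exact List.Sublist.cons₂ x (List.Sublist.trans (List.filter_sublist : (PySem.Set.discard (PySem.Set.ofList xs) x).Sublist (PySem.Set.ofList xs)) ih)

theorem pv_length_ofList_lt {α : Type} [BEq α] [LawfulBEq α] (xs : List α)
    (h : ¬ xs.Nodup) : (PySem.Set.ofList xs).length < xs.length := by
  rcases lt_or_eq_of_le ((pv_ofList_sublist xs).length_le) with hlt | heq
  · exact hlt
  · exact absurd (((pv_ofList_sublist xs).eq_of_length heq) ▸ PySem.Set.nodup_ofList xs) h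

theorem pv_one_lt_ofList_iff {α : Type} [BEq α] [LawfulBEq α] (xs : List α) :
    1 < (PySem.Set.ofList xs).length ↔ ∃ v ∈ xs, ∃ w ∈ xs, v ≠ w := by
  constructor
  · intro h
    match hS : PySem.Set.ofList xs with
    | [] => rw [hS] at h; simp at h
    | [a] => rw [hS] at h; simp at h
    | a :: b :: t =>
      have hnd := PySem.Set.nodup_ofList xs
      rw [hS] at hnd
      have hab : a ≠ b := by
        intro hab; exact (List.nodup_cons.1 hnd).1 (hab ▸ List.mem_cons_self ..)
      have ha : a ∈ xs := (PySem.Set.mem_ofList ..).1 (hS ▸ List.mem_cons_self ..)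
      have hb : b ∈ xs := (PySem.Set.mem_ofList ..).1
        (hS ▸ List.mem_cons_of_mem _ (List.mem_cons_self ..))
      exact ⟨a, ha, b, hb, hab⟩
  · rintro ⟨v, hv, w, hw, hvw⟩
    have hv' : v ∈ PySem.Set.ofList xs := (PySem.Set.mem_ofList ..).2 hv
    have hw' : w ∈ PySem.Set.ofList xs := (PySem.Set.mem_ofList ..).2 hw
    match hS : PySem.Set.ofList xs with
    | [] => rw [hS] at hv'; simp at hv'
    | [a] =>
      rw [hS] at hv' hw'; simp at hv' hw'
      exact absurd (hv'.trans hw'.symm) hvw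
    | a :: b :: t => simp
  
-- membership in A's accumulated field set
theorem pv_mem_fields {α : Type} (dc : List α) (g : α → List String)
    (s : PySem.Set String) (y : String) :
    y ∈ dc.foldl (fun s d => PySem.Set.update s (g d)) s ↔ y ∈ s ∨ ∃ d ∈ dc, y ∈ g d := by
  induction dc generalizing s with
  | nil => simp
  | cons d dc ih =>
    simp only [List.foldl_cons, ih, PySem.Set.mem_update, List.mem_cons]
    constructor
    · rintro (⟨h | h⟩ | ⟨e, he, hy⟩)
      · exact Or.inl h
      · exact Or.inr ⟨d, Or.inl rfl, h⟩
      · exact Or.inr ⟨e, Or.inr he, hy⟩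
    · rintro (h | ⟨e, (rfl | he), hy⟩)
      · exact Or.inl (Or.inl h)
      · exact Or.inl (Or.inr hy)
      · exact Or.inr ⟨e, he, hy⟩

-- assoc-list first-match lookup under distinct keys
theorem pv_find?_of_mem (l : List (String × String)) (hnd : (l.map Prod.fst).Nodup)
    {f v : String} (hm : (f, v) ∈ l) :
    l.find? (fun p => p.1 == f) = some (f, v) := by
  have hsome : (l.find? (fun p => p.1 == f)).isSome := by
    rw [List.find?_isSome]; exact ⟨(f, v), hm, by simp⟩
  obtain ⟨q, hq⟩ := Option.isSome_iff_exists.1 hsome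
  have hqmem : q ∈ l := List.mem_of_find?_eq_some hq
  have hqf : q.1 = f := by simpa using List.find?_some hq
  have : q = (f, v) := List.inj_on_of_nodup_map hnd hqmem hm (by simp [hqf])
  rw [hq, this]

theorem pv_a_iff (dc : List (String × List (String × String)))
    (hpre : Pre_check_value_conflicts_py dc) :
    check_value_conflicts_py dc = true ↔ pvConflict dc := by
  simp only [check_value_conflicts_py, PySem.List.foldl_append_if, List.nil_append]
  simp only [List.any_eq_true, decide_eq_true_eq]
  unfold pvConflict pvPairs
  constructor
  · rintro ⟨f, hf, hgt⟩
    rw [pv_one_lt_ofList_iff] at hgt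
    obtain ⟨v, hv, w, hw, hvw⟩ := hgt
    have hmem : ∀ u : String, u ∈ (dc.filter (fun d => d.2.any (fun p => p.1 == f))).map
        (fun d => ((d.2.find? (fun p => p.1 == f)).map Prod.snd).getD "") →
        (f, u) ∈ dc.flatMap (fun d => d.2) := by
      intro u hu
      obtain ⟨d, hd, hgu⟩ := List.mem_map.1 hu
      obtain ⟨hddc, hany⟩ := List.mem_filter.1 hd
      have hsome : (d.2.find? (fun p => p.1 == f)).isSome := by
        rw [List.find?_isSome]
        obtain ⟨pr, hpr, hprf⟩ := List.any_eq_true.1 hany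
        exact ⟨pr, hpr, hprf⟩
      obtain ⟨q, hq⟩ := Option.isSome_iff_exists.1 hsome
      have hqmem : q ∈ d.2 := List.mem_of_find?_eq_some hq
      have hqf : q.1 = f := by simpa using List.find?_some hq
      have hqu : q.2 = u := by rw [hq] at hgu; simpa using hgu
      exact List.mem_flatMap.2 ⟨d, hddc, by rw [← hqf, ← hqu]; exact hqmem⟩
    exact ⟨(f, v), hmem v hv, (f, w), hmem w hw, rfl, hvw⟩
  · rintro ⟨p, hp, q, hq, hfst, hsnd⟩
    obtain ⟨d, hd, hpd⟩ := List.mem_flatMap.1 hp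
    obtain ⟨e, he, hqe⟩ := List.mem_flatMap.1 hq
    refine ⟨p.1, ?_, ?_⟩
    · rw [pv_mem_fields]
      exact Or.inr ⟨d, hd, List.mem_map.2 ⟨p, hpd, rfl⟩⟩
    · rw [pv_one_lt_ofList_iff]
      have hval : ∀ (r : String × String), r ∈ dc.flatMap (fun d => d.2) →
          ∀ c ∈ dc, r ∈ c.2 → r.1 = p.1 →
          r.2 ∈ (dc.filter (fun d => d.2.any (fun pr => pr.1 == p.1))).map
            (fun d => ((d.2.find? (fun pr => pr.1 == p.1)).map Prod.snd).getD "") := by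
        intro r _ c hc hrc hr1
        refine List.mem_map.2 ⟨c, List.mem_filter.2 ⟨hc, ?_⟩, ?_⟩
        · exact List.any_eq_true.2 ⟨r, hrc, by simp [hr1]⟩
        · have : c.2.find? (fun pr => pr.1 == p.1) = some (p.1, r.2) := by
            apply pv_find?_of_mem c.2 (hpre c hc)
            rw [← hr1]
            simpa using hrc
          rw [this]
          rfl
      exact ⟨p.2, hval p hp d hd hpd rfl, q.2, hval q hq e he hqe hfst.symm, hsnd⟩

theorem pv_b_iff (dc : List (String × List (String × String))) :
    check_value_conflicts_py_alt dc = true ↔ pvConflict dc := by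
  simp only [check_value_conflicts_py_alt, PySem.Set.len, decide_eq_true_eq, Nat.cast_lt]
  unfold pvConflict pvPairs
  set L := dc.flatMap (fun d => d.2) with hL
  have hnd : (PySem.Set.ofList L).Nodup := PySem.Set.nodup_ofList L
  have key : (PySem.Set.ofList ((PySem.Set.ofList L).map Prod.fst)).length
      < (PySem.Set.ofList L).length ↔ ¬ ((PySem.Set.ofList L).map Prod.fst).Nodup := by
    constructor
    · intro h hnod
      rw [PySem.Set.ofList_eq_self_of_nodup _ hnod, List.length_map] at h
      exact lt_irrefl _ h
    · intro h
      have := pv_length_ofList_lt ((PySem.Set.ofList L).map Prod.fst) h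
      rwa [List.length_map] at this
  rw [key, List.nodup_map_iff_inj_on hnd]
  push Not
  constructor
  · rintro ⟨p, hp, q, hq, hfst, hne⟩
    exact ⟨p, (PySem.Set.mem_ofList ..).1 hp, q, (PySem.Set.mem_ofList ..).1 hq, hfst,
      fun h2 => hne (Prod.ext hfst h2)⟩
  · rintro ⟨p, hp, q, hq, hfst, hsnd⟩
    exact ⟨p, (PySem.Set.mem_ofList ..).2 hp, q, (PySem.Set.mem_ofList ..).2 hq, hfst,
      fun h => hsnd (congrArg Prod.snd h)⟩

-- ===== VERDICT (by name: the statement is the Claim_ definition above) =====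
theorem check_value_conflicts_py_spec : Claim_equal_check_value_conflicts_py := by
  intro dc _ hpre
  unfold Spec_check_value_conflicts_py
  rw [Bool.eq_iff_iff, pv_a_iff dc hpre, pv_b_iff dc]
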